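-- pv_equiv track=rewrite | github.com/M1229012/Stock_V116 | main.py | prev_trade_date
-- ===== SOURCE A (Python) =====
-- def prev_trade_date(d, cal_dates):
--     try:
--         idx = cal_dates.index(d)
--         return cal_dates[idx - 1] if idx > 0 else None
--     except:
--         for i in range(len(cal_dates) - 1, -1, -1):
--             if cal_dates[i] < d:
--                 return cal_dates[i]
--         return None
-- ===== SOURCE B (Python) =====
-- def prev_trade_date(d, cal_dates):
--     # single forward pass: track the previous element and the last element < d
--     prev = None
--     cand = None
--     for x in cal_dates:
--         if x == d:
--             return prev
--         prev = x
--         if x < d: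
--             cand = x
--     return cand
-- ===== Notes on version B (the rewrite author's own statement) =====
-- stated objective: alternative
-- what changed: One forward pass tracking the previous element and the last element < d replaces A's .index() lookup with subscripting plus a separate reverse index scan over range(len-1,-1,-1).
import Mathlib
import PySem

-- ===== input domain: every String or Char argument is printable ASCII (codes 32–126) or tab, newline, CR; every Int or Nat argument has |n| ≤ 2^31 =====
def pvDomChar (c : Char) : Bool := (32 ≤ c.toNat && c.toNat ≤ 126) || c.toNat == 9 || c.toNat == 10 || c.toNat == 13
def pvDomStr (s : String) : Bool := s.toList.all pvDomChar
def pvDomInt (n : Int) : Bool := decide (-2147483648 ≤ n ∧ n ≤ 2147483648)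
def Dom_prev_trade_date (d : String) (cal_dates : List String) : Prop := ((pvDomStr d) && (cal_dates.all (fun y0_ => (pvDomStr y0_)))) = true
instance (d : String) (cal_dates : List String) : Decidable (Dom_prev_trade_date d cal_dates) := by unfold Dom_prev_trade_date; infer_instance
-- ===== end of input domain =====

-- B replaces A's .index()+subscript plus a separate reverse index scan by one forward pass
-- tracking the previous element and the last element < d (alternative decomposition, same cost).

-- ===== PORT A =====
-- fallback loop: 'for i in range(len(cal_dates)-1, -1, -1): if cal_dates[i] < d: return cal_dates[i]'
def prevA_fallback (d : String) (cal_dates : List String) : List Int → Option String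
  | [] => none
  | i :: rest =>
    match PySem.List.pyGet? cal_dates i with
    | some x => if x < d then some x else prevA_fallback d cal_dates rest
    | none => none

def prev_trade_date (d : String) (cal_dates : List String) : Option String :=
  match PySem.List.index? cal_dates d with
  | some idx => if (idx : Int) > 0 then PySem.List.pyGet? cal_dates ((idx : Int) - 1) else none
  | none => prevA_fallback d cal_dates (PySem.List.pyRange ((cal_dates.length : Int) - 1) (-1) (-1))

-- ===== PORT B =====
-- one forward pass: 'prev' = previous element, 'cand' = last element < d seen so far
def prevB_loop (d : String) (prev cand : Option String) : List String → Option String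
  | [] => cand
  | x :: rest =>
    if x = d then prev
    else prevB_loop d (some x) (if x < d then some x else cand) rest

def prev_trade_date_alt (d : String) (cal_dates : List String) : Option String :=
  prevB_loop d none none cal_dates

-- ===== PRECONDITION & SPEC =====
def Spec_prev_trade_date (d : String) (cal_dates : List String) (out : Option String) : Prop := out = prev_trade_date_alt d cal_dates
instance (d : String) (cal_dates : List String) (out : Option String) : Decidable (Spec_prev_trade_date d cal_dates out) := by unfold Spec_prev_trade_date; infer_instance

-- ===== CLAIM (what is proved, stated in full; the proofs are below) =====
def Claim_equal_prev_trade_date : Prop := ∀ (d : String) (cal_dates : List String), Dom_prev_trade_date d cal_dates → Spec_prev_trade_date d cal_dates (prev_trade_date d cal_dates)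

-- ===== LEMMAS AND PROOFS =====

theorem prevB_not_mem (d : String) (p c : Option String) (l : List String) (h : d ∉ l) :
    prevB_loop d p c l = Option.or (l.reverse.find? (fun x => decide (x < d))) c := by
  induction l generalizing p c with
  | nil => simp [prevB_loop]
  | cons x rest ih =>
    simp only [List.mem_cons, not_or] at h
    rw [prevB_loop]
    rw [if_neg (fun hx => h.1 hx.symm)]
    rw [ih _ _ h.2]
    simp only [List.reverse_cons, List.find?_append]
    cases hf : rest.reverse.find? (fun x => decide (x < d)) with
    | some y => simp [Option.or]
    | none =>
      by_cases hx : x < d <;> simp [Option.or, List.find?, hx]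

theorem prevB_mem (d : String) (p c : Option String) (pre suf : List String) (h : d ∉ pre) :
    prevB_loop d p c (pre ++ d :: suf) = Option.or pre.getLast? p := by
  induction pre generalizing p c with
  | nil => simp [prevB_loop]
  | cons x rest ih =>
    simp only [List.mem_cons, not_or] at h
    rw [List.cons_append, prevB_loop, if_neg (fun hx => h.1 hx.symm), ih _ _ h.2]
    cases hr : rest.getLast? with
    | some y => simp [Option.or, List.getLast?_cons, hr]
    | none =>
      have : rest = [] := List.getLast?_eq_none_iff.mp hr
      subst this; simp [Option.or]

theorem prevA_fallback_eq (d : String) (l : List String) :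
    ∀ n : Nat, n ≤ l.length →
      prevA_fallback d l (PySem.List.pyRange ((n : Int) - 1) (-1) (-1)) =
        (l.take n).reverse.find? (fun x => decide (x < d)) := by
  intro n
  induction n with
  | zero =>
    intro _
    rw [PySem.List.pyRange_neg_one_eq_nil (by norm_num)]
    simp [prevA_fallback]
  | succ k ih =>
    intro hk
    have h1 : ((k + 1 : Nat) : Int) - 1 = (k : Int) := by push_cast; ring
    rw [h1, PySem.List.pyRange_neg_one_cons (by exact_mod_cast Int.lt_of_lt_of_le (by norm_num) (Int.ofNat_nonneg k))]
    have hklen : k < l.length := by omega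
    rw [prevA_fallback, PySem.List.pyGet?_natCast, List.getElem?_eq_getElem hklen]
    have htake : (l.take (k + 1)).reverse = l[k] :: (l.take k).reverse := by
      rw [List.take_succ, List.getElem?_eq_getElem hklen]
      simp
    rw [htake, List.find?_cons]
    by_cases hx : l[k] < d
    · simp [hx]
    · simp only [hx, decide_false]
      exact ih (by omega)


-- ===== VERDICT (by name: the statement is the Claim_ definition above) =====
theorem prev_trade_date_spec : Claim_equal_prev_trade_date := by
  unfold Claim_equal_prev_trade_date Spec_prev_trade_date
  intro d l _
  unfold prev_trade_date_alt
  cases hidx : PySem.List.index? l d with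
  | none =>
    have hA : prev_trade_date d l =
        prevA_fallback d l (PySem.List.pyRange ((l.length : Int) - 1) (-1) (-1)) := by
      unfold prev_trade_date; rw [hidx]
    have hnm : d ∉ l := (PySem.List.index?_eq_none_iff l d).mp hidx
    rw [hA, prevB_not_mem d none none l hnm]
    have := prevA_fallback_eq d l l.length (le_refl _)
    rw [List.take_length] at this
    rw [this, Option.or_none]
  | some k =>
    have hA : prev_trade_date d l =
        (if (k : Int) > 0 then PySem.List.pyGet? l ((k : Int) - 1) else none) := by
      unfold prev_trade_date; rw [hidx]
    obtain ⟨pre, suf, hl, hlen, hnm⟩ := (PySem.List.index?_eq_some_iff l d k).mp hidx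
    subst hl
    rw [hA, prevB_mem d none none pre suf hnm]
    by_cases hk : (k : Int) > 0
    · rw [if_pos hk]
      have hk1 : (k : Int) - 1 = ((k - 1 : Nat) : Int) := by omega
      have hpre : 0 < pre.length := by omega
      rw [hk1, PySem.List.pyGet?_natCast]
      rw [List.getElem?_append_left (by omega)]
      rw [← hlen]
      cases hgl : pre.getLast? with
      | none =>
        exact absurd (List.getLast?_eq_none_iff.mp hgl) (List.ne_nil_of_length_pos hpre)
      | some y =>
        rw [List.getLast?_eq_getElem?] at hgl
        simp [Option.or, ← hgl]
    · rw [if_neg hk]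
      have hk0 : k = 0 := by omega
      subst hk0
      have hpre : pre = [] := List.eq_nil_of_length_eq_zero hlen
      subst hpre
      simp [Option.or]
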